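-- pv_equiv track=rewrite | github.com/peterjc123/functionary | functionary/train/train_lora_mlx.py | extract_unmasked_chunks
-- ===== SOURCE A (Python) =====
-- from typing import Any, Dict, List, Optional
--
-- def extract_unmasked_chunks(labels: List[int], masked_value) -> List[List[int]]:
--     """This function is used to extract unmasked chunks of integer
--     For example, labels = [-100, -100, 1, 2, 3, -100, -100, 4, 5] --> chunks = [[1,2,3], [4,5]]
--     Args:
--         labels (List[int]): list of integer containing token_id and -100
--
--     Returns:
--         List[List[int]]: list of chunk, for example: [[1,2,3], [4,5]]
--     """
--     chunks = []
--     chunk = []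
--     for token_id in labels:
--         if token_id != masked_value:
--             chunk.append(token_id)
--         else:
--             if len(chunk) > 0:
--                 chunks.append(chunk)
--                 chunk = []
--     if len(chunk) > 0:
--         chunks.append(chunk)
--     return chunks
-- ===== SOURCE B (Python) =====
-- def extract_unmasked_chunks(labels, masked_value):
--     cuts = [i for i, t in enumerate(labels) if t == masked_value]
--     bounds = zip([-1] + cuts, cuts + [len(labels)])
--     return [labels[a + 1:b] for a, b in bounds if b - a > 1]
-- ===== Notes on version B (the rewrite author's own statement) =====
-- stated objective: alternative
-- what changed: Replaces A's single-pass accumulator loop with flush logic by a staged index-based algorithm: collect the indices of masked tokens, zip them into consecutive cut boundaries, and slice the list between cuts, keeping slices of positive length.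
import Mathlib
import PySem

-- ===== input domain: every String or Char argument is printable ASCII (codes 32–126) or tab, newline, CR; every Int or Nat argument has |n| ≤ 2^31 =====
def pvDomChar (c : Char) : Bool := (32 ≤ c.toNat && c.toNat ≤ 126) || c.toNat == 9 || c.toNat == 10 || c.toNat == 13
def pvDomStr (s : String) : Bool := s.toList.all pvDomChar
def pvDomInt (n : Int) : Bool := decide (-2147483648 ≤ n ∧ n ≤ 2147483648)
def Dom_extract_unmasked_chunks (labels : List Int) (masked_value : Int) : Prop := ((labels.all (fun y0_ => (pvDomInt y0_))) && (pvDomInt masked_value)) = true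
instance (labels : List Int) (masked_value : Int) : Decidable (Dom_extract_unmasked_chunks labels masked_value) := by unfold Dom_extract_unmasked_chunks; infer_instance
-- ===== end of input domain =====

-- B replaces A's explicit accumulator-with-flush loop by a staged, index-based algorithm:
-- collect the indices of masked tokens, form cut boundaries, and slice the list between
-- consecutive cuts, keeping the non-empty slices (alternative decomposition, same O(n)).


-- ===== PORT A =====
-- A: fold over labels carrying (chunks, chunk); flush chunk on masked token and at the end.
def extract_unmasked_chunks (labels : List Int) (masked_value : Int) : List (List Int) :=
  let s := labels.foldl
    (fun (st : List (List Int) × List Int) token_id =>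
      if token_id ≠ masked_value then (st.1, st.2 ++ [token_id])
      else if st.2.length > 0 then (st.1 ++ [st.2], ([] : List Int))
      else (st.1, st.2))
    (([] : List (List Int)), ([] : List Int))
  if s.2.length > 0 then s.1 ++ [s.2] else s.1

-- ===== PORT B =====
-- B: cuts = indices of masked tokens; bounds = zip([-1]+cuts, cuts+[len]); keep each
-- slice labels[a+1:b] with b-a > 1.
def extract_unmasked_chunks_alt (labels : List Int) (masked_value : Int) : List (List Int) :=
  let cuts : List Int :=
    ((PySem.List.enumerate labels).filter (fun p => p.2 == masked_value)).map (fun p => p.1)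
  let bounds := List.zip ((-1 : Int) :: cuts) (cuts ++ [(labels.length : Int)])
  bounds.filterMap (fun p =>
    if p.2 - p.1 > 1 then some (PySem.List.slice labels (some (p.1 + 1)) (some p.2)) else none)

-- ===== PRECONDITION & SPEC =====
def Spec_extract_unmasked_chunks (labels : List Int) (masked_value : Int) (out : List (List Int)) : Prop := out = extract_unmasked_chunks_alt labels masked_value
instance (labels : List Int) (masked_value : Int) (out : List (List Int)) : Decidable (Spec_extract_unmasked_chunks labels masked_value out) := by unfold Spec_extract_unmasked_chunks; infer_instance

-- ===== CLAIM (what is proved, stated in full; the proofs are below) =====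
def Claim_equal_extract_unmasked_chunks : Prop := ∀ (labels : List Int) (masked_value : Int), Dom_extract_unmasked_chunks labels masked_value → Spec_extract_unmasked_chunks labels masked_value (extract_unmasked_chunks labels masked_value)

-- ===== LEMMAS AND PROOFS =====

-- proof-only reference function: the recursive run-split of labels into maximal
-- non-masked runs; both ports are proved equal to it.
def pvR (m : Int) : List Int → List (List Int)
  | [] => []
  | x :: xs =>
    if x ≠ m then
      (x :: xs.takeWhile (· ≠ m)) :: pvR m (xs.dropWhile (· ≠ m))
    else
      pvR m (xs.dropWhile (· = m))
  termination_by xs => xs.length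
  decreasing_by
    · exact Nat.lt_succ_of_le (List.length_dropWhile_le _ _)
    · exact Nat.lt_succ_of_le (List.length_dropWhile_le _ _)

-- proof-only helper: the residue of A's fold started with pending chunk `c`.
def pvG (m : Int) (c : List Int) : List Int → List (List Int)
  | [] => if c = [] then [] else [c]
  | x :: xs =>
    if x ≠ m then pvG m (c ++ [x]) xs
    else (if c = [] then [] else [c]) ++ pvG m [] xs

-- one unfolding of pvR as a run split
theorem pvR_run (m : Int) (xs : List Int) :
    pvR m xs =
      (if xs.takeWhile (· ≠ m) = [] then [] else [xs.takeWhile (· ≠ m)]) ++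
        pvR m (xs.dropWhile (· ≠ m)) := by
  match xs with
  | [] => simp [pvR]
  | y :: ys =>
    by_cases h : y = m
    · rw [pvR]
      simp [h]
      rw [pvR]
      simp
    · rw [pvR]
      simp [h]

theorem pvR_skip (m : Int) (xs : List Int) :
    pvR m (xs.dropWhile (· = m)) = pvR m xs := by
  match xs with
  | [] => simp
  | z :: zs =>
    by_cases h : z = m
    · have : pvR m (z :: zs) = pvR m (zs.dropWhile (· = m)) := by
        rw [pvR]; simp [h]
      rw [this]
      simp [h]
    · simp [h]

theorem pvG_eq (m : Int) (xs : List Int) : ∀ c : List Int,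
    pvG m c xs =
      (if c ++ xs.takeWhile (· ≠ m) = [] then [] else [c ++ xs.takeWhile (· ≠ m)]) ++
        pvR m (xs.dropWhile (· ≠ m)) := by
  induction xs with
  | nil =>
    intro c
    simp [pvG, pvR]
  | cons x xs ih =>
    intro c
    by_cases h : x = m
    · simp only [pvG, h, ne_eq, not_true_eq_false, if_false]
      rw [ih [], List.nil_append, ← pvR_run, ← pvR_skip m xs]
      have : pvR m (x :: xs) = pvR m (xs.dropWhile (· = m)) := by
        rw [pvR]; simp [h]
      rw [h] at this
      rw [this.symm]
      simp
    · simp only [pvG, List.takeWhile_cons, List.dropWhile_cons]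
      rw [ih (c ++ [x])]
      simp [h]

theorem fold_eq (m : Int) (xs : List Int) : ∀ (chunks : List (List Int)) (c : List Int),
    (let s := xs.foldl
      (fun (st : List (List Int) × List Int) token_id =>
        if token_id ≠ m then (st.1, st.2 ++ [token_id])
        else if st.2.length > 0 then (st.1 ++ [st.2], ([] : List Int))
        else (st.1, st.2)) (chunks, c)
     if s.2.length > 0 then s.1 ++ [s.2] else s.1) = chunks ++ pvG m c xs := by
  induction xs with
  | nil =>
    intro chunks c
    by_cases h : c = [] <;> simp [pvG, h, List.length_pos_iff]
  | cons x xs ih =>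
    intro chunks c
    by_cases h : x = m
    · by_cases hc : c = []
      · simpa [pvG, h, hc, List.foldl_cons] using ih chunks []
      · have : c.length > 0 := List.length_pos_iff.mpr hc
        simpa [pvG, h, hc, this, List.foldl_cons, List.append_assoc] using ih (chunks ++ [c]) []
    · simpa [pvG, h, List.foldl_cons] using ih chunks (c ++ [x])

theorem A_eq_pvR (m : Int) (xs : List Int) :
    extract_unmasked_chunks xs m = pvR m xs := by
  rw [extract_unmasked_chunks]
  rw [fold_eq m xs [] []]
  rw [pvG_eq m xs []]
  simp only [List.nil_append]
  rw [← pvR_run]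

-- ===== B side =====

-- proof-only helper: the cut indices of masked tokens, recursively.
def pvCuts (m : Int) : List Int → List Int
  | [] => []
  | x :: xs =>
    if x = m then (0 : Int) :: (pvCuts m xs).map (· + 1) else (pvCuts m xs).map (· + 1)

-- proof-only helper: the bounds/slice stage of B, parametrised by the cut list.
def pvBody (labels : List Int) (cuts : List Int) : List (List Int) :=
  (List.zip ((-1 : Int) :: cuts) (cuts ++ [(labels.length : Int)])).filterMap (fun p =>
    if p.2 - p.1 > 1 then some (PySem.List.slice labels (some (p.1 + 1)) (some p.2)) else none)

theorem cuts_expr_eq (m : Int) (xs : List Int) : ∀ s : Int,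
    ((PySem.List.enumerate xs s).filter (fun p => p.2 == m)).map (fun p => p.1)
      = (pvCuts m xs).map (· + s) := by
  induction xs with
  | nil => intro s; rw [PySem.List.enumerate_nil]; simp [pvCuts]
  | cons x xs ih =>
    intro s
    rw [PySem.List.enumerate_cons]
    by_cases h : x = m
    · simp only [List.filter_cons, beq_iff_eq, h, if_true, List.map_cons, pvCuts,
        ih (s + 1), List.map_map]
      congr 1
      · omega
      · apply List.map_congr_left
        intro a _
        simp only [Function.comp_apply]
        omega
    · simp only [List.filter_cons, beq_iff_eq, h, if_false, pvCuts,
        ih (s + 1), List.map_map]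
      apply List.map_congr_left
      intro a _
      simp only [Function.comp_apply]
      omega

theorem pvCuts_nonneg (m : Int) (xs : List Int) : ∀ y ∈ pvCuts m xs, 0 ≤ y := by
  induction xs with
  | nil => simp [pvCuts]
  | cons x xs ih =>
    intro y hy
    simp only [pvCuts] at hy
    by_cases h : x = m
    · rw [if_pos h] at hy
      rcases List.mem_cons.mp hy with rfl | hy
      · omega
      · rcases List.mem_map.mp hy with ⟨a, ha, rfl⟩
        have := ih a ha; omega
    · rw [if_neg h] at hy
      rcases List.mem_map.mp hy with ⟨a, ha, rfl⟩
      have := ih a ha; omega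

theorem pvCuts_nil_iff (m : Int) (xs : List Int) :
    pvCuts m xs = [] ↔ ∀ y ∈ xs, y ≠ m := by
  induction xs with
  | nil => simp [pvCuts]
  | cons x xs ih =>
    by_cases h : x = m
    · simp [pvCuts, h]
    · simp [pvCuts, h, ih]

theorem pvCuts_head (m : Int) (xs : List Int) (c0 : Int) (cr : List Int)
    (h : pvCuts m xs = c0 :: cr) : c0 = ((xs.takeWhile (· ≠ m)).length : Int) := by
  induction xs generalizing c0 cr with
  | nil => simp [pvCuts] at h
  | cons x xs ih =>
    by_cases hx : x = m
    · simp only [pvCuts, if_pos hx] at h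
      cases h
      simp [hx]
    · simp only [pvCuts, if_neg hx] at h
      rcases List.map_eq_cons_iff.mp h with ⟨c0', cr', hcuts, hc0, _⟩
      subst hc0
      rw [ih c0' cr' hcuts]
      simp [hx]

-- slicing a cons with shifted nonnegative bounds
theorem slice_cons_shift (x : Int) (xs : List Int) (i j : Int) (hi : 0 ≤ i) (hj : 0 ≤ j) :
    PySem.List.slice (x :: xs) (some (i + 1)) (some (j + 1)) =
      PySem.List.slice xs (some i) (some j) := by
  obtain ⟨ni, rfl⟩ := Int.eq_ofNat_of_zero_le hi
  obtain ⟨nj, rfl⟩ := Int.eq_ofNat_of_zero_le hj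
  have h1 : ((ni : Int) + 1) = ((ni + 1 : Nat) : Int) := by omega
  have h2 : ((nj : Int) + 1) = ((nj + 1 : Nat) : Int) := by omega
  rw [h1, h2, PySem.List.slice_natCast, PySem.List.slice_natCast]
  simp [Nat.succ_sub_succ]

theorem pvBody_cons_masked (m : Int) (x : Int) (xs : List Int) (hx : x = m) :
    pvBody (x :: xs) (pvCuts m (x :: xs)) = pvBody xs (pvCuts m xs) := by
  have hcuts : pvCuts m (x :: xs) = (0 : Int) :: (pvCuts m xs).map (· + 1) := by
    simp [pvCuts, hx]
  rw [hcuts]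
  unfold pvBody
  have hlen : ((x :: xs).length : Int) = (xs.length : Int) + 1 := by simp
  rw [hlen]
  have hz : List.zip ((0 : Int) :: (pvCuts m xs).map (· + 1))
        ((pvCuts m xs).map (· + 1) ++ [(xs.length : Int) + 1])
      = (List.zip ((-1 : Int) :: pvCuts m xs) (pvCuts m xs ++ [(xs.length : Int)])).map
          (fun p => (p.1 + 1, p.2 + 1)) := by
    have e1 : ((0 : Int) :: (pvCuts m xs).map (· + 1)) = ((-1 : Int) :: pvCuts m xs).map (· + 1) := by
      simp
    have e2 : ((pvCuts m xs).map (· + 1) ++ [(xs.length : Int) + 1])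
        = (pvCuts m xs ++ [(xs.length : Int)]).map (· + 1) := by
      simp
    rw [e1, e2, List.zip_map]
    rfl
  rw [List.cons_append, List.zip_cons_cons, hz, List.filterMap_cons, List.filterMap_map]
  have hhead : (if (0 : Int) - (-1) > 1 then
      some (PySem.List.slice (x :: xs) (some ((-1 : Int) + 1)) (some 0)) else none) = none := by
    norm_num
  rw [hhead]
  apply List.filterMap_congr
  intro p hp
  obtain ⟨hp1, hp2⟩ := List.of_mem_zip hp
  have ha : -1 ≤ p.1 := by
    rcases List.mem_cons.mp hp1 with h | h
    · omega
    · have := pvCuts_nonneg m xs p.1 h; omega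
  have hb : 0 ≤ p.2 := by
    rcases List.mem_append.mp hp2 with h | h
    · exact pvCuts_nonneg m xs p.2 h
    · simp at h; omega
  simp only [Function.comp_apply]
  have hcond : (p.2 + 1 - (p.1 + 1) > 1) ↔ (p.2 - p.1 > 1) := by omega
  by_cases hc : p.2 - p.1 > 1
  · rw [if_pos (by omega), if_pos hc]
    have : p.1 + 1 + 1 = (p.1 + 1) + 1 := by ring
    rw [this, slice_cons_shift x xs (p.1 + 1) p.2 (by omega) hb]
  · rw [if_neg (by omega), if_neg hc]

theorem pvBody_cons_unmasked (m : Int) (x : Int) (xs : List Int) (hx : x ≠ m)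
    (ih : pvBody xs (pvCuts m xs) = pvR m xs) :
    pvBody (x :: xs) (pvCuts m (x :: xs)) = pvR m (x :: xs) := by
  have hcuts : pvCuts m (x :: xs) = (pvCuts m xs).map (· + 1) := by
    simp [pvCuts, hx]
  have hR : pvR m (x :: xs) = (x :: xs.takeWhile (· ≠ m)) :: pvR m (xs.dropWhile (· ≠ m)) := by
    rw [pvR]; simp [hx]
  rcases hcase : pvCuts m xs with _ | ⟨c0, cr⟩
  · -- no masked token in xs: single slice = whole list
    have hall : ∀ y ∈ xs, y ≠ m := (pvCuts_nil_iff m xs).mp hcase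
    have htw : xs.takeWhile (· ≠ m) = xs := by
      apply List.takeWhile_eq_self_iff.mpr
      intro a ha
      simp [hall a ha]
    have hdw : xs.dropWhile (· ≠ m) = [] := by
      apply List.dropWhile_eq_nil_iff.mpr
      intro a ha
      simp [hall a ha]
    rw [hcuts, hcase]
    unfold pvBody
    simp only [List.map_nil, List.nil_append, List.zip_cons_cons, List.zip_nil_right,
      List.filterMap_cons, List.filterMap_nil]
    have hlen : ((x :: xs).length : Int) = (xs.length : Int) + 1 := by simp
    rw [hlen]
    have hcond : ((xs.length : Int) + 1 - (-1) > 1) := by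
      have : (0 : Int) ≤ (xs.length : Int) := by positivity
      omega
    rw [if_pos hcond]
    have hslice : PySem.List.slice (x :: xs) (some ((-1 : Int) + 1)) (some ((xs.length : Int) + 1))
        = x :: xs := by
      norm_num
      have : ((xs.length : Int) + 1) = (((xs.length + 1 : Nat)) : Int) := by omega
      rw [this, PySem.List.slice_to_natCast]
      simp
    rw [hslice, hR, hdw, htw]
    simp [pvR]
  · -- first masked token of xs at index c0 = |takeWhile|
    have hc0 : c0 = ((xs.takeWhile (· ≠ m)).length : Int) := pvCuts_head m xs c0 cr hcase
    have hc0n : 0 ≤ c0 := by rw [hc0]; positivity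
    set tw := xs.takeWhile (· ≠ m) with htw
    -- B on xs, split off the head pair (-1, c0)
    have hxsbody : pvBody xs (pvCuts m xs)
        = (if c0 + 1 > 1 then [PySem.List.slice xs (some 0) (some c0)] else [])
            ++ (List.zip (c0 :: cr) (cr ++ [(xs.length : Int)])).filterMap (fun p =>
                if p.2 - p.1 > 1 then some (PySem.List.slice xs (some (p.1 + 1)) (some p.2))
                else none) := by
      rw [hcase]
      unfold pvBody
      rw [List.cons_append, List.zip_cons_cons, List.filterMap_cons]
      have : c0 - (-1) > 1 ↔ c0 + 1 > 1 := by omega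
      by_cases hgt : c0 + 1 > 1
      · rw [if_pos (by omega), if_pos hgt]
        norm_num
      · rw [if_neg (by omega), if_neg hgt]
        simp
    -- slice xs[0:c0] is the first run tw
    have hslice0 : PySem.List.slice xs (some 0) (some c0) = tw := by
      rw [hc0, PySem.List.slice_zero_start, PySem.List.slice_to_natCast]
      exact (List.prefix_iff_eq_take.mp (List.takeWhile_prefix _)).symm
    -- B on x::xs
    rw [hcuts, hcase]
    unfold pvBody
    have hlen : ((x :: xs).length : Int) = (xs.length : Int) + 1 := by simp
    rw [hlen]
    simp only [List.map_cons, List.cons_append, List.zip_cons_cons, List.filterMap_cons]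
    have hz : List.zip ((c0 + 1) :: cr.map (· + 1)) (cr.map (· + 1) ++ [(xs.length : Int) + 1])
        = (List.zip (c0 :: cr) (cr ++ [(xs.length : Int)])).map (fun p => (p.1 + 1, p.2 + 1)) := by
      have e1 : ((c0 + 1) :: cr.map (· + 1)) = (c0 :: cr).map (· + 1) := by simp
      have e2 : (cr.map (· + 1) ++ [(xs.length : Int) + 1]) = (cr ++ [(xs.length : Int)]).map (· + 1) := by
        simp
      rw [e1, e2, List.zip_map]
      rfl
    rw [hz, List.filterMap_map]
    have hheadcond : c0 + 1 - (-1) > 1 := by omega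
    rw [if_pos hheadcond]
    have hheadslice : PySem.List.slice (x :: xs) (some ((-1 : Int) + 1)) (some (c0 + 1)) = x :: tw := by
      norm_num
      have h1 : (c0 + 1) = (((tw.length + 1 : Nat)) : Int) := by rw [hc0]; omega
      rw [h1, PySem.List.slice_to_natCast]
      simp only [List.take_succ_cons]
      congr 1
      have := hslice0
      rw [hc0, PySem.List.slice_zero_start, PySem.List.slice_to_natCast] at this
      simpa using this
    rw [hheadslice]
    -- tail pairs: shift down by one onto xs
    have htail : (List.zip (c0 :: cr) (cr ++ [(xs.length : Int)])).filterMap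
          ((fun p => if p.2 - p.1 > 1 then
              some (PySem.List.slice (x :: xs) (some (p.1 + 1)) (some p.2)) else none)
            ∘ (fun p => (p.1 + 1, p.2 + 1)))
        = (List.zip (c0 :: cr) (cr ++ [(xs.length : Int)])).filterMap (fun p =>
            if p.2 - p.1 > 1 then some (PySem.List.slice xs (some (p.1 + 1)) (some p.2))
            else none) := by
      apply List.filterMap_congr
      intro p hp
      obtain ⟨hp1, hp2⟩ := List.of_mem_zip hp
      have hcr : ∀ y ∈ cr, 0 ≤ y := by
        intro y hy
        exact pvCuts_nonneg m xs y (by rw [hcase]; exact List.mem_cons_of_mem _ hy)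
      have ha : 0 ≤ p.1 := by
        rcases List.mem_cons.mp hp1 with h | h
        · omega
        · exact hcr _ h
      have hb : 0 ≤ p.2 := by
        rcases List.mem_append.mp hp2 with h | h
        · exact hcr _ h
        · simp at h; omega
      simp only [Function.comp_apply]
      by_cases hc : p.2 - p.1 > 1
      · rw [if_pos (by omega), if_pos hc]
        have : p.1 + 1 + 1 = (p.1 + 1) + 1 := by ring
        rw [this, slice_cons_shift x xs (p.1 + 1) p.2 (by omega) hb]
      · rw [if_neg (by omega), if_neg hc]
    rw [htail]
    -- now compare with pvR via the run split of xs
    have hRxs : pvR m xs = (if tw = [] then [] else [tw]) ++ pvR m (xs.dropWhile (· ≠ m)) :=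
      pvR_run m xs
    have hprefix_eq : (if c0 + 1 > 1 then [PySem.List.slice xs (some 0) (some c0)] else [])
        = (if tw = [] then [] else [tw]) := by
      by_cases he : tw = []
      · have : c0 = 0 := by rw [hc0, he]; simp
        rw [if_neg (by omega), if_pos he]
      · have : 0 < tw.length := List.length_pos_iff.mpr he
        rw [if_pos (by rw [hc0]; omega), if_neg he, hslice0]
    have htailR : (List.zip (c0 :: cr) (cr ++ [(xs.length : Int)])).filterMap (fun p =>
            if p.2 - p.1 > 1 then some (PySem.List.slice xs (some (p.1 + 1)) (some p.2))
            else none)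
        = pvR m (xs.dropWhile (· ≠ m)) := by
      have := ih
      rw [hxsbody, hRxs, hprefix_eq] at this
      exact List.append_cancel_left this
    rw [htailR, hR]

theorem pvBody_pvCuts_eq (m : Int) (xs : List Int) :
    pvBody xs (pvCuts m xs) = pvR m xs := by
  induction xs with
  | nil => simp [pvBody, pvCuts, pvR]
  | cons x xs ih =>
    by_cases hx : x = m
    · rw [pvBody_cons_masked m x xs hx, ih]
      have : pvR m (x :: xs) = pvR m (xs.dropWhile (· = m)) := by
        rw [pvR]; simp [hx]
      rw [this, pvR_skip]
    · exact pvBody_cons_unmasked m x xs hx ih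

theorem B_eq_pvR (m : Int) (xs : List Int) :
    extract_unmasked_chunks_alt xs m = pvR m xs := by
  have halt : extract_unmasked_chunks_alt xs m = pvBody xs (pvCuts m xs) := by
    unfold extract_unmasked_chunks_alt pvBody
    have := cuts_expr_eq m xs 0
    simp only [Int.add_zero] at this
    rw [this]
    simp
  rw [halt, pvBody_pvCuts_eq]

-- ===== VERDICT (by name: the statement is the Claim_ definition above) =====
theorem extract_unmasked_chunks_spec : Claim_equal_extract_unmasked_chunks := by
  intro labels m _
  show extract_unmasked_chunks labels m = extract_unmasked_chunks_alt labels m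
  rw [A_eq_pvR, B_eq_pvR]
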